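-- pv_equiv track=rewrite | github.com/matthewdeanmartin/safari_writer | safari_slides/parser.py | _split_notes
-- ===== SOURCE A (Python) =====
-- def _split_notes(slide_text: str) -> tuple[list[str], tuple[str, ...]]:
--     body_lines: list[str] = []
--     notes: list[str] = []
--     in_notes_block = False
--     directive_notes = False
--     for raw_line in slide_text.splitlines():
--         stripped = raw_line.strip()
--         if directive_notes:
--             if stripped == ":::":
--                 directive_notes = False
--                 continue
--             notes.append(raw_line.rstrip())
--             continue
--         if in_notes_block:
--             notes.append(raw_line.rstrip())
--             continue
--         if stripped.lower() == "note:":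
--             in_notes_block = True
--             continue
--         if stripped.lower() == "::: notes":
--             directive_notes = True
--             continue
--         body_lines.append(raw_line.rstrip())
--     cleaned_notes = tuple(line for line in (note.strip() for note in notes) if line)
--     return body_lines, cleaned_notes
-- ===== SOURCE B (Python) =====
-- def _scan(lines, pred):
--     """Index of the first line satisfying pred, or len(lines)."""
--     for j, line in enumerate(lines):
--         if pred(line):
--             return j
--     return len(lines)
--
--
-- def _split_notes(slide_text: str) -> tuple[list[str], tuple[str, ...]]:
--     body: list[str] = []
--     notes: list[str] = []
--     rest = slide_text.splitlines()
--     while rest: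
--         j = _scan(rest, lambda l: l.strip().lower() in ("note:", "::: notes"))
--         body += [l.rstrip() for l in rest[:j]]
--         if j == len(rest):
--             break
--         if rest[j].strip().lower() == "note:":
--             notes += [l.rstrip() for l in rest[j + 1:]]
--             break
--         tail = rest[j + 1:]
--         k = _scan(tail, lambda l: l.strip() == ":::")
--         notes += [l.rstrip() for l in tail[:k]]
--         rest = tail[k + 1:]
--     cleaned = tuple(s for s in (n.strip() for n in notes) if s)
--     return body, cleaned
-- ===== Notes on version B (the rewrite author's own statement) =====
-- stated objective: alternative
-- what changed: Replaced A's per-line four-state state machine with a segment-based decomposition: repeatedly search for the next marker line and handle whole body/notes segments via index search and slicing.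
import Mathlib
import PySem

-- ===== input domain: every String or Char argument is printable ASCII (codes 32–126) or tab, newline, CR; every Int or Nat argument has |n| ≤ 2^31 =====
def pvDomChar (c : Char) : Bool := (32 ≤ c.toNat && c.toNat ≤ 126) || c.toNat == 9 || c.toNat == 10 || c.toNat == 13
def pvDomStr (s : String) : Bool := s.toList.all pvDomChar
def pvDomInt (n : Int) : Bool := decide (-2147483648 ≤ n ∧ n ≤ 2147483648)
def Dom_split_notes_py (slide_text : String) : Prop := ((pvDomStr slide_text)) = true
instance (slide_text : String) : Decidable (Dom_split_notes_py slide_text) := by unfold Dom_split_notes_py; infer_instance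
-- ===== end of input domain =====

-- B: instead of A's four-state per-line state machine, B repeatedly searches for the next
-- marker line and handles whole segments via index search + slices (alternative decomposition).

-- ===== PORT A =====
-- A's for-loop over splitlines with state (body, notes, in_notes_block, directive_notes)
def aLoop : List String → List String → List String → Bool → Bool → List String × List String
  | [], body, notes, _, _ => (body, notes)
  | raw :: ls, body, notes, inb, dir =>
    let stripped := PySem.Str.strip raw
    if dir then
      if stripped == ":::" then aLoop ls body notes inb false
      else aLoop ls body (notes ++ [PySem.Str.rstrip raw]) inb dir
    else if inb then aLoop ls body (notes ++ [PySem.Str.rstrip raw]) inb dir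
    else if PySem.Str.lower stripped == "note:" then aLoop ls body notes true dir
    else if PySem.Str.lower stripped == "::: notes" then aLoop ls body notes inb true
    else aLoop ls (body ++ [PySem.Str.rstrip raw]) notes inb dir

def split_notes_py (slide_text : String) : List String × List String :=
  let r := aLoop (PySem.Str.splitlines slide_text) [] [] false false
  (r.1, ((r.2.map PySem.Str.strip).filter (fun line => !(line == ""))))

-- ===== PORT B =====
def pvScan (p : String → Bool) : List String → Nat
  | [] => 0
  | l :: ls => if p l then 0 else pvScan p ls + 1

def pvMarker (l : String) : Bool :=
  PySem.Str.lower (PySem.Str.strip l) == "note:" || PySem.Str.lower (PySem.Str.strip l) == "::: notes"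

def pvClose (l : String) : Bool := PySem.Str.strip l == ":::"

def altLoop (rest : List String) : List String × List String :=
  match h : rest.drop (pvScan pvMarker rest) with
  | [] => ((rest.take (pvScan pvMarker rest)).map PySem.Str.rstrip, [])
  | m :: tail =>
    if PySem.Str.lower (PySem.Str.strip m) == "note:" then
      ((rest.take (pvScan pvMarker rest)).map PySem.Str.rstrip, tail.map PySem.Str.rstrip)
    else
      ((rest.take (pvScan pvMarker rest)).map PySem.Str.rstrip ++
         (altLoop (tail.drop (pvScan pvClose tail + 1))).1,
       (tail.take (pvScan pvClose tail)).map PySem.Str.rstrip ++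
         (altLoop (tail.drop (pvScan pvClose tail + 1))).2)
termination_by rest.length
decreasing_by
  have h1 : (rest.drop (pvScan pvMarker rest)).length = tail.length + 1 := by rw [h]; simp
  have h2 : (rest.drop (pvScan pvMarker rest)).length ≤ rest.length := by simp
  have h3 : (tail.drop (pvScan pvClose tail + 1)).length ≤ tail.length := by simp
  omega

def split_notes_py_alt (slide_text : String) : List String × List String :=
  let r := altLoop (PySem.Str.splitlines slide_text)
  (r.1, ((r.2.map PySem.Str.strip).filter (fun line => !(line == ""))))

-- ===== PRECONDITION & SPEC =====
def Spec_split_notes_py (slide_text : String) (out : List String × List String) : Prop := out = split_notes_py_alt slide_text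
instance (slide_text : String) (out : List String × List String) : Decidable (Spec_split_notes_py slide_text out) := by unfold Spec_split_notes_py; infer_instance

-- ===== CLAIM (what is proved, stated in full; the proofs are below) =====
def Claim_equal_split_notes_py : Prop := ∀ (slide_text : String), Dom_split_notes_py slide_text → Spec_split_notes_py slide_text (split_notes_py slide_text)

-- ===== LEMMAS AND PROOFS =====
-- plain (non-dependent) unfolding of altLoop
lemma altLoop_eq (rest : List String) : altLoop rest =
    (match rest.drop (pvScan pvMarker rest) with
     | [] => ((rest.take (pvScan pvMarker rest)).map PySem.Str.rstrip, [])
     | m :: tail =>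
       if PySem.Str.lower (PySem.Str.strip m) == "note:" then
         ((rest.take (pvScan pvMarker rest)).map PySem.Str.rstrip, tail.map PySem.Str.rstrip)
       else
         ((rest.take (pvScan pvMarker rest)).map PySem.Str.rstrip ++
            (altLoop (tail.drop (pvScan pvClose tail + 1))).1,
          (tail.take (pvScan pvClose tail)).map PySem.Str.rstrip ++
            (altLoop (tail.drop (pvScan pvClose tail + 1))).2)) := by
  rw [altLoop.eq_def]
  split <;> rename_i heq <;> split <;> rename_i heq2 <;> simp_all

-- in_notes_block mode: everything remaining becomes a note
lemma aLoop_inb (lines : List String) : ∀ body notes,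
    aLoop lines body notes true false = (body, notes ++ lines.map PySem.Str.rstrip) := by
  induction lines with
  | nil => simp [aLoop]
  | cons l ls ih =>
      intro body notes
      simp [aLoop, ih, List.append_assoc]

-- directive mode: notes until the first ':::' line, then back to the neutral state
lemma aLoop_dir (lines : List String) : ∀ body notes,
    aLoop lines body notes false true =
      aLoop (lines.drop (pvScan pvClose lines + 1)) body
        (notes ++ (lines.take (pvScan pvClose lines)).map PySem.Str.rstrip) false false := by
  induction lines with
  | nil => simp [aLoop]
  | cons l ls ih =>
      intro body notes
      by_cases hc : pvClose l = true
      · have hc' : (PySem.Str.strip l == ":::") = true := hc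
        simp [aLoop, pvScan, hc, hc']
      · have hc' : (PySem.Str.strip l == ":::") = false := by
          simpa [pvClose] using hc
        simp [aLoop, pvScan, hc, hc', ih, List.append_assoc]

lemma alt_cons_nonmarker {l : String} (ls : List String) (h : pvMarker l = false) :
    altLoop (l :: ls) = (PySem.Str.rstrip l :: (altLoop ls).1, (altLoop ls).2) := by
  have hscan : pvScan pvMarker (l :: ls) = pvScan pvMarker ls + 1 := by
    simp [pvScan, h]
  rw [altLoop_eq, altLoop_eq]
  simp only [hscan, List.take_succ_cons, List.drop_succ_cons]
  cases hd : ls.drop (pvScan pvMarker ls) with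
  | nil => simp
  | cons m tail =>
      by_cases hm : (PySem.Str.lower (PySem.Str.strip m) == "note:") = true
      · simp [hm]
      · simp [hm]

lemma alt_cons_note {l : String} (ls : List String)
    (h : (PySem.Str.lower (PySem.Str.strip l) == "note:") = true) :
    altLoop (l :: ls) = ([], ls.map PySem.Str.rstrip) := by
  have hm : pvMarker l = true := by simp [pvMarker, h]
  have hscan : pvScan pvMarker (l :: ls) = 0 := by simp [pvScan, hm]
  rw [altLoop_eq]
  simp [hscan, h]

lemma alt_cons_directive {l : String} (ls : List String)
    (hn : (PySem.Str.lower (PySem.Str.strip l) == "note:") = false)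
    (h : (PySem.Str.lower (PySem.Str.strip l) == "::: notes") = true) :
    altLoop (l :: ls) =
      ((altLoop (ls.drop (pvScan pvClose ls + 1))).1,
       (ls.take (pvScan pvClose ls)).map PySem.Str.rstrip ++
         (altLoop (ls.drop (pvScan pvClose ls + 1))).2) := by
  have hm : pvMarker l = true := by simp [pvMarker, h]
  have hscan : pvScan pvMarker (l :: ls) = 0 := by simp [pvScan, hm]
  rw [altLoop_eq]
  simp [hscan, hn]

lemma aLoop_eq_altLoop : ∀ (n : Nat) (lines : List String), lines.length ≤ n →
    ∀ body notes, aLoop lines body notes false false =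
      (body ++ (altLoop lines).1, notes ++ (altLoop lines).2) := by
  intro n
  induction n with
  | zero =>
      intro lines hlen body notes
      have : lines = [] := List.eq_nil_of_length_eq_zero (Nat.le_zero.mp hlen)
      subst this
      rw [altLoop_eq]; simp [aLoop, pvScan]
  | succ n ih =>
      intro lines hlen body notes
      cases lines with
      | nil => rw [altLoop_eq]; simp [aLoop, pvScan]
      | cons l ls =>
          by_cases hnote : (PySem.Str.lower (PySem.Str.strip l) == "note:") = true
          · rw [alt_cons_note ls hnote]
            simp [aLoop, hnote, aLoop_inb]
          · by_cases hdir : (PySem.Str.lower (PySem.Str.strip l) == "::: notes") = true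
            · rw [alt_cons_directive ls (by simpa using hnote) hdir]
              have hstep : aLoop (l :: ls) body notes false false = aLoop ls body notes false true := by
                simp [aLoop, hnote, hdir]
              rw [hstep, aLoop_dir]
              rw [ih _ (by simp at hlen ⊢; omega)]
              simp [List.append_assoc]
            · have hm : pvMarker l = false := by
                simp [pvMarker, hnote, hdir]
              rw [alt_cons_nonmarker ls hm]
              have hstep : aLoop (l :: ls) body notes false false =
                  aLoop ls (body ++ [PySem.Str.rstrip l]) notes false false := by
                simp [aLoop, hnote, hdir]
              rw [hstep, ih _ (by simpa using hlen)]
              simp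

-- ===== VERDICT (by name: the statement is the Claim_ definition above) =====
theorem split_notes_py_spec : Claim_equal_split_notes_py := by
  intro slide_text _
  unfold Spec_split_notes_py split_notes_py split_notes_py_alt
  rw [aLoop_eq_altLoop (PySem.Str.splitlines slide_text).length _ le_rfl]
  simp
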